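-- pv_equiv track=rewrite | github.com/va64doman/codility | Challenges/zinc2018.py | theaterTickets
-- ===== SOURCE A (Python) =====
-- def theaterTickets(A):
--     combinations = {}
--     combinationsOfOne = 0
--     combinationsOfTwo = 0
--     combinationsOfThree = 0
--     length = len(A)
--     for i in range(length):
--         currentCombinationsOfTwo = combinationsOfOne
--         if A[i] not in combinations:
--             combinations[A[i]] = [0,0]
--             combinationsOfOne += 1
--         currentCombinationsOfThree = combinationsOfTwo
--         combinationsOfTwo += currentCombinationsOfTwo - combinations[A[i]][0]
--         combinations[A[i]][0] = currentCombinationsOfTwo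
--         combinationsOfThree += currentCombinationsOfThree - combinations[A[i]][1]
--         combinations[A[i]][1] = currentCombinationsOfThree
--         combinationsOfThree %= 1000000007
--     return combinationsOfThree
--     pass
-- ===== SOURCE B (Python) =====
-- def theaterTickets(A):
--     # Materialize the distinct 1-, 2- and 3-element subsequences as sets of
--     # value tuples, then count the 3-tuples.  No counters, no dict, no
--     # incremental modular arithmetic: explicit enumeration + dedup sets.
--     ones = set()
--     twos = set()
--     threes = set()
--     for v in A:
--         threes |= {(x, y, v) for (x, y) in twos}
--         twos |= {(x, v) for x in ones}
--         ones.add(v)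
--     return len(threes) % 1000000007
-- ===== Notes on version B (the rewrite author's own statement) =====
-- stated objective: alternative
-- what changed: Replaced A's incremental counting DP (a dict of two per-value counters and running modular totals) by explicit materialization of the distinct 1-/2-/3-element subsequence value tuples in dedup sets, returning len of the 3-tuple set mod 1000000007.
import Mathlib
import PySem

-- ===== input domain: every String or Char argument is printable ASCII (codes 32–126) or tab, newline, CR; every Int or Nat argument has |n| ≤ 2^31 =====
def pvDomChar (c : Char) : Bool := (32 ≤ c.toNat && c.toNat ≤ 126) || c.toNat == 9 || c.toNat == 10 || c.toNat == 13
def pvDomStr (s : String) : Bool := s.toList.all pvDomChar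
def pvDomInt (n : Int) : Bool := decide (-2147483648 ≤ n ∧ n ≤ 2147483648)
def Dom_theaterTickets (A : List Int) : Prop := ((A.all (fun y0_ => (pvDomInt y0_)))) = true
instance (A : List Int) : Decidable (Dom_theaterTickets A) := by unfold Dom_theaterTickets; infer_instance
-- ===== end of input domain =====

-- B replaces A's incremental per-value counter DP (dict of two counters per value, running
-- modular totals) by explicit materialization of the distinct 1-/2-/3-element value
-- subsequences as dedup sets of tuples, counting the 3-tuples at the end (alternative
-- algorithm, not faster). Both compute the number of distinct 3-element subsequences
-- by value, mod 1000000007.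

-- ===== PORT A =====
-- Python's per-value 2-element list [a, b] is ported as the pair (a, b) (exact: only
-- indices 0 and 1 are ever read or written).
-- Loop body of A's for-loop (the dict lookup A[i] uses getD (0,0); the key is always
-- present at that point, so the default is never read).
def taStep (st : PySem.Dict Int (Int × Int) × Int × Int × Int) (ai : Int) :
    PySem.Dict Int (Int × Int) × Int × Int × Int :=
  let d := st.1
  let c1 := st.2.1
  let c2 := st.2.2.1
  let c3 := st.2.2.2
  let cur2 := c1                                  -- currentCombinationsOfTwo = combinationsOfOne
  let dc1 :=                                      -- if A[i] not in combinations: insert [0,0]; c1 += 1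
    if (d.get? ai).isNone then (d.insert ai ((0 : Int), (0 : Int)), c1 + 1) else (d, c1)
  let d := dc1.1
  let c1 := dc1.2
  let cur3 := c2                                  -- currentCombinationsOfThree = combinationsOfTwo
  let stored := (d.get? ai).getD (0, 0)           -- combinations[A[i]]
  let c2 := c2 + (cur2 - stored.1)                -- combinationsOfTwo += cur2 - combinations[A[i]][0]
  let d := d.insert ai (cur2, stored.2)           -- combinations[A[i]][0] = cur2
  let c3 := c3 + (cur3 - stored.2)                -- combinationsOfThree += cur3 - combinations[A[i]][1]
  let d := d.insert ai (cur2, cur3)               -- combinations[A[i]][1] = cur3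
  let c3 := PySem.Int.mod c3 1000000007           -- combinationsOfThree %= 1000000007
  (d, c1, c2, c3)

def theaterTickets (A : List Int) : Int :=
  let length := PySem.List.len A
  let fin := (PySem.List.pyRange 0 length).foldl
    (fun st i => taStep st (PySem.List.pyGetD A i 0)) ((PySem.Dict.empty : PySem.Dict Int (Int × Int)), 0, 0, 0)
  fin.2.2.2

-- ===== PORT B =====
-- Loop body of B's for-loop.  The set comprehensions {(x,y,v) for (x,y) in twos} /
-- {(x,v) for x in ones} are ported as .map over the set's element list (the result is
-- only unioned into a set, so element order cannot matter).
def bStep (st : PySem.Set Int × PySem.Set (Int × Int) × PySem.Set (Int × Int × Int)) (v : Int) :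
    PySem.Set Int × PySem.Set (Int × Int) × PySem.Set (Int × Int × Int) :=
  let ones := st.1
  let twos := st.2.1
  let threes := st.2.2
  let threes := PySem.Set.union threes (twos.map (fun p => (p.1, p.2, v)))
  let twos := PySem.Set.union twos (ones.map (fun x => (x, v)))
  let ones := PySem.Set.add ones v
  (ones, twos, threes)

def theaterTickets_alt (A : List Int) : Int :=
  let fin := A.foldl bStep
    ((PySem.Set.empty : PySem.Set Int), (PySem.Set.empty : PySem.Set (Int × Int)),
     (PySem.Set.empty : PySem.Set (Int × Int × Int)))
  PySem.Int.mod ((fin.2.2.length : Int)) 1000000007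

-- ===== PRECONDITION & SPEC =====
def Spec_theaterTickets (A : List Int) (out : Int) : Prop := out = theaterTickets_alt A
instance (A : List Int) (out : Int) : Decidable (Spec_theaterTickets A out) := by unfold Spec_theaterTickets; infer_instance

-- ===== CLAIM (what is proved, stated in full; the proofs are below) =====
def Claim_equal_theaterTickets : Prop := ∀ (A : List Int), Dom_theaterTickets A → Spec_theaterTickets A (theaterTickets A)

-- ===== LEMMAS AND PROOFS =====

-- The invariant tying A's state (dict, c1, c2, c3) to B's state (ones, twos, threes):
-- the counters are the cardinalities of B's sets (c3 reduced mod 1000000007), the dict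
-- stores, for each value v, the number of distinct 2-subsequences ending in v and the
-- number of distinct 3-subsequences ending in v, the dict's keys are exactly the seen
-- values, and B's sets are closed under taking prefixes of their tuples.
def pvInv (sa : PySem.Dict Int (Int × Int) × Int × Int × Int)
    (sb : PySem.Set Int × PySem.Set (Int × Int) × PySem.Set (Int × Int × Int)) : Prop :=
  sb.1.Nodup ∧ sb.2.1.Nodup ∧ sb.2.2.Nodup ∧
  sa.2.1 = (sb.1.toFinset.card : Int) ∧
  sa.2.2.1 = (sb.2.1.toFinset.card : Int) ∧
  sa.2.2.2 = PySem.Int.mod ((sb.2.2.toFinset.card : Int)) 1000000007 ∧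
  (∀ v : Int, (sa.1.get? v).isSome = true ↔ v ∈ sb.1) ∧
  (∀ v : Int, (sa.1.get? v).getD (0, 0) =
      (((sb.2.1.toFinset.filter (fun p => p.2 = v)).card : Int),
       ((sb.2.2.toFinset.filter (fun t => t.2.2 = v)).card : Int))) ∧
  (∀ p ∈ sb.2.1, p.1 ∈ sb.1) ∧
  (∀ t ∈ sb.2.2, (t.1, t.2.1) ∈ sb.2.1)

lemma pvToFinset_union {α : Type} [DecidableEq α] [BEq α] [LawfulBEq α] (s t : List α) :
    (PySem.Set.union s t).toFinset = s.toFinset ∪ t.toFinset := by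
  ext x; simp [PySem.Set.mem_union]

lemma pvToFinset_add {α : Type} [DecidableEq α] [BEq α] [LawfulBEq α] (s : List α) (x : α) :
    (PySem.Set.add s x).toFinset = insert x s.toFinset := by
  ext y; simp [PySem.Set.mem_add]; tauto

lemma pvToFinset_map {α β : Type} [DecidableEq α] [DecidableEq β] (l : List α) (f : α → β) :
    (l.map f).toFinset = l.toFinset.image f := by
  ext x; simp

-- One level of "append value v": S is the set of tuples built so far, P the set of
-- one-shorter prefixes, f extends a prefix by v, pr reads a tuple's last component.
lemma pvAux {α β : Type} [DecidableEq α] [DecidableEq β] (S : Finset β) (P : Finset α)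
    (f : α → β) (pr : β → Int) (v : Int) (hinj : Function.Injective f)
    (hf : ∀ a : α, pr (f a) = v) (hcl : ∀ b ∈ S, pr b = v → ∃ a ∈ P, f a = b) :
    (S ∪ P.image f).card + (S.filter (fun b => pr b = v)).card = S.card + P.card ∧
    ((S ∪ P.image f).filter (fun b => pr b = v)).card = P.card ∧
    ∀ w : Int, w ≠ v → (S ∪ P.image f).filter (fun b => pr b = w) = S.filter (fun b => pr b = w) := by
  have hinter : S ∩ P.image f = S.filter (fun b => pr b = v) := by
    ext b
    simp only [Finset.mem_inter, Finset.mem_filter, Finset.mem_image]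
    constructor
    · rintro ⟨hb, a, _, rfl⟩; exact ⟨hb, hf a⟩
    · rintro ⟨hb, hv⟩; exact ⟨hb, hcl b hb hv⟩
  refine ⟨?_, ?_, ?_⟩
  · rw [← hinter, ← Finset.card_image_of_injective P hinj]
    exact Finset.card_union_add_card_inter S _
  · have h1 : (P.image f).filter (fun b => pr b = v) = P.image f :=
      Finset.filter_true_of_mem (by rintro b hb; obtain ⟨a, _, rfl⟩ := Finset.mem_image.mp hb; exact hf a)
    have h2 : S.filter (fun b => pr b = v) ⊆ P.image f := by
      intro b hb
      obtain ⟨hbS, hbv⟩ := Finset.mem_filter.mp hb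
      obtain ⟨a, ha, rfl⟩ := hcl b hbS hbv
      exact Finset.mem_image_of_mem f ha
    rw [Finset.filter_union, h1, Finset.union_eq_right.mpr h2,
      Finset.card_image_of_injective P hinj]
  · intro w hw
    have h1 : (P.image f).filter (fun b => pr b = w) = ∅ :=
      Finset.filter_false_of_mem (by
        rintro b hb hbw
        obtain ⟨a, _, rfl⟩ := Finset.mem_image.mp hb
        exact hw (hbw.symm.trans (hf a)))
    rw [Finset.filter_union, h1, Finset.union_empty]

lemma pvStep (sa : PySem.Dict Int (Int × Int) × Int × Int × Int)
    (sb : PySem.Set Int × PySem.Set (Int × Int) × PySem.Set (Int × Int × Int))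
    (v : Int) (h : pvInv sa sb) : pvInv (taStep sa v) (bStep sb v) := by
  obtain ⟨d, c1, c2, c3⟩ := sa
  obtain ⟨ones, twos, threes⟩ := sb
  obtain ⟨hn1, hn2, hn3, hc1, hc2, hc3, hmem, hval, hcl2, hcl3⟩ := h
  simp only at hn1 hn2 hn3 hc1 hc2 hc3 hmem hval hcl2 hcl3
  -- the two "append v" levels
  obtain ⟨hcard2, hfv2, hfw2⟩ := pvAux twos.toFinset ones.toFinset (fun x => (x, v)) (fun p => p.2) v
    (by intro a b hab; simpa using congrArg Prod.fst hab)
    (fun a => rfl)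
    (by
      rintro ⟨x, y⟩ hb hbv
      dsimp only at hbv; subst hbv
      exact ⟨x, List.mem_toFinset.mpr (hcl2 _ (List.mem_toFinset.mp hb)), rfl⟩)
  obtain ⟨hcard3, hfv3, hfw3⟩ := pvAux threes.toFinset twos.toFinset (fun p => (p.1, p.2, v)) (fun t => t.2.2) v
    (by
      intro a b hab
      have hab' : (a.1, a.2, v) = (b.1, b.2, v) := hab
      obtain ⟨h1, h2⟩ : a.1 = b.1 ∧ a.2 = b.2 := by simpa using hab'
      cases a; cases b; simp_all)
    (fun a => rfl)
    (by
      rintro ⟨x, y, z⟩ hb hbv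
      dsimp only at hbv; subst hbv
      exact ⟨(x, y), List.mem_toFinset.mpr (hcl3 _ (List.mem_toFinset.mp hb)), rfl⟩)
  -- B's new sets, as Finsets
  have hT2 : (PySem.Set.union twos (ones.map (fun x => (x, v)))).toFinset =
      twos.toFinset ∪ ones.toFinset.image (fun x => (x, v)) := by
    rw [pvToFinset_union, pvToFinset_map]
  have hT3 : (PySem.Set.union threes (twos.map (fun p => (p.1, p.2, v)))).toFinset =
      threes.toFinset ∪ twos.toFinset.image (fun p => (p.1, p.2, v)) := by
    rw [pvToFinset_union, pvToFinset_map]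
  have hO : (PySem.Set.add ones v).toFinset = insert v ones.toFinset := pvToFinset_add ones v
  by_cases hsome : (d.get? v).isSome = true
  · -- v already a key: no pre-insert, c1 unchanged
    obtain ⟨p, hp⟩ := Option.isSome_iff_exists.mp hsome
    have hvIn : v ∈ ones := (hmem v).mp hsome
    have hstored := hval v
    rw [hp, Option.getD_some] at hstored
    simp only [taStep, bStep, hp, Option.isNone_some, Bool.false_eq_true, if_false,
      Option.getD_some]
    subst hstored
    unfold pvInv
    dsimp only
    refine ⟨PySem.Set.nodup_add ones v hn1, PySem.Set.nodup_union _ _ hn2,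
      PySem.Set.nodup_union _ _ hn3, ?_, ?_, ?_, ?_, ?_, ?_, ?_⟩
    · -- c1
      rw [hO, Finset.insert_eq_self.mpr (List.mem_toFinset.mpr hvIn), hc1]
    · -- c2
      rw [hT2, hc1, hc2]; omega
    · -- c3
      rw [hT3, hc2, hc3]
      simp only [PySem.Int.mod_eq_emod_of_pos (show (0:Int) < 1000000007 by norm_num)]
      omega
    · -- keys ↔ seen
      intro w
      by_cases hwv : w = v
      · subst hwv
        simp [PySem.Dict.get?_insert_self, PySem.Set.mem_add]
      · rw [PySem.Dict.get?_insert_of_ne _ _ hwv, PySem.Dict.get?_insert_of_ne _ _ hwv]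
        rw [hmem w]
        simp [PySem.Set.mem_add, hwv]
    · -- stored pairs
      intro w
      by_cases hwv : w = v
      · subst hwv
        rw [PySem.Dict.get?_insert_self]
        rw [Option.getD_some, hT2, hT3, hfv2, hfv3, hc1, hc2]
      · rw [PySem.Dict.get?_insert_of_ne _ _ hwv, PySem.Dict.get?_insert_of_ne _ _ hwv]
        rw [hval w, hT2, hT3, hfw2 w hwv, hfw3 w hwv]
    · -- twos closed
      intro q hq2
      rcases PySem.Set.mem_union _ _ _ |>.mp hq2 with hqo | hqn
      · exact PySem.Set.mem_add _ _ _ |>.mpr (Or.inl (hcl2 q hqo))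
      · obtain ⟨x, hx, rfl⟩ := List.mem_map.mp hqn
        exact PySem.Set.mem_add _ _ _ |>.mpr (Or.inl hx)
    · -- threes closed
      intro t ht3
      rcases PySem.Set.mem_union _ _ _ |>.mp ht3 with hto | htn
      · exact PySem.Set.mem_union _ _ _ |>.mpr (Or.inl (hcl3 t hto))
      · obtain ⟨q, hq2, rfl⟩ := List.mem_map.mp htn
        exact PySem.Set.mem_union _ _ _ |>.mpr (Or.inl hq2)
  · -- v is new: A inserts (0,0) and increments c1; the filters at v are empty
    have hnone : d.get? v = none := Option.not_isSome_iff_eq_none.mp hsome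
    have hvOut : v ∉ ones := fun hv => hsome ((hmem v).mpr hv)
    have hzero := hval v
    rw [hnone, Option.getD_none] at hzero
    have hz2 : ((twos.toFinset.filter (fun p => p.2 = v)).card : Int) = 0 :=
      (congrArg Prod.fst hzero).symm
    have hz3 : ((threes.toFinset.filter (fun t => t.2.2 = v)).card : Int) = 0 :=
      (congrArg Prod.snd hzero).symm
    simp only [taStep, bStep, hnone, Option.isNone_none, if_true]
    rw [PySem.Dict.get?_insert_self]
    simp only [Option.getD_some]
    unfold pvInv
    dsimp only
    refine ⟨PySem.Set.nodup_add ones v hn1, PySem.Set.nodup_union _ _ hn2,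
      PySem.Set.nodup_union _ _ hn3, ?_, ?_, ?_, ?_, ?_, ?_, ?_⟩
    · -- c1
      rw [hO, Finset.card_insert_of_notMem (fun hv => hvOut (List.mem_toFinset.mp hv)), hc1]
      omega
    · -- c2
      rw [hT2, hc1, hc2]; omega
    · -- c3
      rw [hT3, hc2, hc3]
      simp only [PySem.Int.mod_eq_emod_of_pos (show (0:Int) < 1000000007 by norm_num)]
      omega
    · -- keys ↔ seen
      intro w
      by_cases hwv : w = v
      · subst hwv
        simp [PySem.Dict.get?_insert_self, PySem.Set.mem_add]
      · rw [PySem.Dict.get?_insert_of_ne _ _ hwv, PySem.Dict.get?_insert_of_ne _ _ hwv,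
          PySem.Dict.get?_insert_of_ne _ _ hwv]
        rw [hmem w]
        simp [PySem.Set.mem_add, hwv]
    · -- stored pairs
      intro w
      by_cases hwv : w = v
      · subst hwv
        rw [PySem.Dict.get?_insert_self]
        rw [Option.getD_some, hT2, hT3, hfv2, hfv3, hc1, hc2]
      · rw [PySem.Dict.get?_insert_of_ne _ _ hwv, PySem.Dict.get?_insert_of_ne _ _ hwv,
          PySem.Dict.get?_insert_of_ne _ _ hwv]
        rw [hval w, hT2, hT3, hfw2 w hwv, hfw3 w hwv]
    · -- twos closed
      intro q hq2
      rcases PySem.Set.mem_union _ _ _ |>.mp hq2 with hqo | hqn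
      · exact PySem.Set.mem_add _ _ _ |>.mpr (Or.inl (hcl2 q hqo))
      · obtain ⟨x, hx, rfl⟩ := List.mem_map.mp hqn
        exact PySem.Set.mem_add _ _ _ |>.mpr (Or.inl hx)
    · -- threes closed
      intro t ht3
      rcases PySem.Set.mem_union _ _ _ |>.mp ht3 with hto | htn
      · exact PySem.Set.mem_union _ _ _ |>.mpr (Or.inl (hcl3 t hto))
      · obtain ⟨q, hq2, rfl⟩ := List.mem_map.mp htn
        exact PySem.Set.mem_union _ _ _ |>.mpr (Or.inl hq2)

lemma pvFold (l : List Int) (sa : PySem.Dict Int (Int × Int) × Int × Int × Int)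
    (sb : PySem.Set Int × PySem.Set (Int × Int) × PySem.Set (Int × Int × Int))
    (h : pvInv sa sb) : pvInv (l.foldl taStep sa) (l.foldl bStep sb) := by
  induction l generalizing sa sb with
  | nil => exact h
  | cons x xs ih => exact ih _ _ (pvStep _ _ _ h)

lemma pvInit : pvInv ((PySem.Dict.empty : PySem.Dict Int (Int × Int)), 0, 0, 0)
    ((PySem.Set.empty : PySem.Set Int), (PySem.Set.empty : PySem.Set (Int × Int)),
     (PySem.Set.empty : PySem.Set (Int × Int × Int))) := by
  refine ⟨List.nodup_nil, List.nodup_nil, List.nodup_nil, ?_, ?_, ?_, ?_, ?_, ?_, ?_⟩ <;>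
    simp [PySem.Set.empty, PySem.Dict.empty, PySem.Dict.get?, PySem.Int.mod]

-- ===== VERDICT (by name: the statement is the Claim_ definition above) =====
theorem theaterTickets_spec : Claim_equal_theaterTickets := by
  intro A _
  show theaterTickets A = theaterTickets_alt A
  obtain ⟨h1, h2, h3, hc1, hc2, hc3, _⟩ := pvFold A _ _ pvInit
  show (List.foldl (fun st i => taStep st (PySem.List.pyGetD A i 0))
      (PySem.Dict.empty, 0, 0, 0) (PySem.List.pyRange 0 (PySem.List.len A))).2.2.2 =
    PySem.Int.mod
      (((List.foldl bStep (PySem.Set.empty, PySem.Set.empty, PySem.Set.empty) A).2.2.length : Int))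
      1000000007
  rw [PySem.List.foldl_pyRange_pyGetD A 0 taStep _ (le_refl 0)]
  simp only [Int.toNat_zero, List.drop_zero]
  rw [hc3, List.toFinset_card_of_nodup h3]
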